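-- pv_equiv track=rewrite | github.com/BARarch/The-Garrisons | Backtracking-Recursions/climbingStaircase.py | climbingStaircase
-- ===== SOURCE A (Python) =====
-- def climbingStaircase(n, k):
--     def jumps(elm):
--         return elm[0]
--
--     def steps(elm):
--         return elm[1]
--
--     from collections import deque
--     q = deque([([], 0), ])
--
--     solns = []
--
--     while q:
--         s = q.pop()
--
--         ## AutoSolution
--         if steps(s) == n:
--             solns.append(jumps(s))
--
--         for i in range(k):
--             i += 1
--
--             if steps(s) + i == n:
--                 ## we have a solution
--                 solns.append(jumps(s) + [i, ])
--             elif steps(s) + i < n: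
--                 ## We have a partial soln
--                 q.append((jumps(s) + [i, ] ,steps(s) + i))
--
--
--     return list(reversed(solns))
-- ===== SOURCE B (Python) =====
-- def climbingStaircase(n, k):
--     solns = []
--
--     def go(rem, path):
--         if rem == 0:
--             solns.append(path)
--             return
--         for i in range(1, k + 1):
--             if i <= rem:
--                 go(rem - i, path + [i])
--
--     go(n, [])
--     return solns
-- ===== Notes on version B (the rewrite author's own statement) =====
-- stated objective: simpler
-- what changed: Replaces the explicit deque worklist (LIFO pops, children pushed largest-last, results reversed at the end) with direct recursive backtracking go(rem, path) that emits solutions already in lexicographic order, with no queue bookkeeping and no final reversal.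
import Mathlib
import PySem

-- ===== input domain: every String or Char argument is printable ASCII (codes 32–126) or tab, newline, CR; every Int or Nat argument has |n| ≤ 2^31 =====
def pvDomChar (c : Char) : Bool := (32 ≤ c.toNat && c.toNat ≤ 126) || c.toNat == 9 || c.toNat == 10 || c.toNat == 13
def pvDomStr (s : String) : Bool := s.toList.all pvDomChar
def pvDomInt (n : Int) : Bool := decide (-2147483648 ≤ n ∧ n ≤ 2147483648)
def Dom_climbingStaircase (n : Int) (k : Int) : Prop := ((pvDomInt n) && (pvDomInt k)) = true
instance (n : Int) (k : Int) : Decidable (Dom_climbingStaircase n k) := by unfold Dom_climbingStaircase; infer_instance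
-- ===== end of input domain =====

-- B replaces A's explicit deque worklist (popped LIFO, results reversed at the end) by direct
-- recursive backtracking that emits solutions already in order; same return value, similar cost.

-- ===== PORT A =====
-- A's deque is popped/appended at the RIGHT end; we represent it reversed (head = right end),
-- so pop = take the head and the ascending pushes i=1..k become conses (latest push at head).
-- The while-loop is made total by a fuel counter proved sufficient below (never hit).
def climbA_loop (n : Int) (k : Int) : Nat → List (List Int × Int) → List (List Int) → List (List Int)
  | 0, _, solns => solns
  | fuel + 1, q, solns =>
    match q with
    | [] => solns
    | s :: rest =>
      let r := (PySem.List.pyRange 1 (k + 1) 1).foldl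
        (fun (acc : List (List Int × Int) × List (List Int)) i =>
          if s.2 + i = n then (acc.1, acc.2 ++ [s.1 ++ [i]])
          else if s.2 + i < n then ((s.1 ++ [i], s.2 + i) :: acc.1, acc.2)
          else acc)
        ([], if s.2 = n then solns ++ [s.1] else solns)
      climbA_loop n k fuel (r.1 ++ rest) r.2

def climbingStaircase (n : Int) (k : Int) : List (List Int) :=
  (climbA_loop n k ((k.toNat + 1) ^ n.toNat) [([], 0)] []).reverse

-- ===== PORT B =====
-- go(rem, path): if rem == 0 append path, else for i in range(1, k+1): if i <= rem: recurse.
def climbB_go (k : Int) (rem : Int) (path : List Int) (solns : List (List Int)) : List (List Int) :=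
  if rem = 0 then solns ++ [path]
  else (PySem.List.pyRange 1 (k + 1) 1).attach.foldl
    (fun acc i => if i.1 ≤ rem then climbB_go k (rem - i.1) (path ++ [i.1]) acc else acc) solns
termination_by rem.toNat
decreasing_by
  have h := (PySem.List.mem_pyRange_one.mp i.2).1
  omega

def climbingStaircase_alt (n : Int) (k : Int) : List (List Int) :=
  climbB_go k n [] []

-- ===== PRECONDITION & SPEC =====
def Spec_climbingStaircase (n : Int) (k : Int) (out : List (List Int)) : Prop := out = climbingStaircase_alt n k
instance (n : Int) (k : Int) (out : List (List Int)) : Decidable (Spec_climbingStaircase n k out) := by unfold Spec_climbingStaircase; infer_instance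

-- ===== CLAIM (what is proved, stated in full; the proofs are below) =====
def Claim_equal_climbingStaircase : Prop := ∀ (n : Int) (k : Int), Dom_climbingStaircase n k → Spec_climbingStaircase n k (climbingStaircase n k)

-- ===== LEMMAS AND PROOFS =====

-- Accumulator-free version of B's recursion.
def climbG (k : Int) (rem : Int) (path : List Int) : List (List Int) :=
  if rem = 0 then [path]
  else ((PySem.List.pyRange 1 (k + 1) 1).attach.map
    (fun i => if i.1 ≤ rem then climbG k (rem - i.1) (path ++ [i.1]) else [])).flatten
termination_by rem.toNat
decreasing_by
  have h := (PySem.List.mem_pyRange_one.mp i.2).1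
  omega

lemma foldl_app {α β : Type} (l : List α) (F : α → List β → List β) (f : α → List β)
    (h : ∀ x ∈ l, ∀ acc, F x acc = acc ++ f x) (init : List β) :
    l.foldl (fun acc x => F x acc) init = init ++ (l.map f).flatten := by
  induction l generalizing init with
  | nil => simp
  | cons x xs ih =>
    rw [List.foldl_cons, h x (by simp), ih (fun y hy acc => h y (by simp [hy]) acc)]
    simp

lemma climbB_go_eq (k rem : Int) (path : List Int) (solns : List (List Int)) :
    climbB_go k rem path solns = solns ++ climbG k rem path := by
  by_cases h0 : rem = 0
  · rw [climbB_go, climbG]; simp [h0]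
  · rw [climbB_go, climbG]
    simp only [h0, if_false]
    exact foldl_app _ _ _
      (fun x _ acc => by
        by_cases hx : x.1 ≤ rem
        · simp only [hx, if_pos]
          exact climbB_go_eq k (rem - x.1) (path ++ [x.1]) acc
        · simp [hx])
      solns
termination_by rem.toNat
decreasing_by
  have h := (PySem.List.mem_pyRange_one.mp x.2).1
  omega

-- climbG without the attach wrapper.
lemma climbG_unf (k rem : Int) (path : List Int) (h : rem ≠ 0) :
    climbG k rem path =
      ((PySem.List.pyRange 1 (k + 1) 1).map
        (fun i => if i ≤ rem then climbG k (rem - i) (path ++ [i]) else [])).flatten := by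
  rw [climbG]
  simp only [h, if_false]
  congr 1
  exact List.attach_map_val (f := fun i => if i ≤ rem then climbG k (rem - i) (path ++ [i]) else [])

-- What one pop of A contributes, as filters of the range.
lemma stepFold (n st : Int) (p : List Int) (l : List Int)
    (acc : List (List Int × Int)) (sol : List (List Int)) :
    l.foldl
      (fun (a : List (List Int × Int) × List (List Int)) i =>
        if st + i = n then (a.1, a.2 ++ [p ++ [i]])
        else if st + i < n then ((p ++ [i], st + i) :: a.1, a.2)
        else a) (acc, sol)
    = ((l.filter (fun i => decide (st + i < n))).reverse.map (fun i => (p ++ [i], st + i)) ++ acc,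
       sol ++ (l.filter (fun i => decide (st + i = n))).map (fun i => p ++ [i])) := by
  induction l generalizing acc sol with
  | nil => simp
  | cons x xs ih =>
    by_cases h1 : st + x = n
    · have h2 : ¬ st + x < n := by omega
      simp [h1, ih]
    · by_cases h2 : st + x < n
      · simp [h1, h2, ih]
      · simp [h1, h2, ih]

-- The reverse of B's output decomposed exactly as A's per-pop appends and pushes.
lemma climbG_rev (k rem : Int) (path : List Int) :
    (climbG k rem path).reverse =
      (if rem = 0 then [path] else [])
      ++ ((PySem.List.pyRange 1 (k + 1) 1).filter (fun i => decide (i = rem))).map (fun i => path ++ [i])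
      ++ (((PySem.List.pyRange 1 (k + 1) 1).filter (fun i => decide (i < rem))).reverse.map
            (fun i => (climbG k (rem - i) (path ++ [i])).reverse)).flatten := by
  by_cases h0 : rem = 0
  · subst h0
    rw [climbG]
    have he : ∀ (pr : Int → Bool), (∀ i, 1 ≤ i → pr i = false) →
        (PySem.List.pyRange 1 (k + 1) 1).filter pr = [] := by
      intro pr hp
      exact List.filter_eq_nil_iff.mpr
        (fun i hi => by rw [hp i (PySem.List.mem_pyRange_one.mp hi).1]; simp)
    rw [he _ (fun i hi => by simp; omega), he _ (fun i hi => by simp; omega)]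
    simp
  · rw [climbG_unf k rem path h0]
    by_cases hneg : rem < 0
    · have hmapnil : ((PySem.List.pyRange 1 (k + 1) 1).map
          (fun i => if i ≤ rem then climbG k (rem - i) (path ++ [i]) else [])).flatten = [] := by
        apply List.flatten_eq_nil_iff.mpr
        intro l hl
        obtain ⟨i, hi, rfl⟩ := List.mem_map.mp hl
        have := (PySem.List.mem_pyRange_one.mp hi).1
        simp only [if_neg (by omega : ¬ i ≤ rem)]
      have he : ∀ (pr : Int → Bool), (∀ i, 1 ≤ i → pr i = false) →
          (PySem.List.pyRange 1 (k + 1) 1).filter pr = [] := by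
        intro pr hp
        exact List.filter_eq_nil_iff.mpr
          (fun i hi => by rw [hp i (PySem.List.mem_pyRange_one.mp hi).1]; simp)
      rw [hmapnil, he _ (fun i hi => by simp; omega), he _ (fun i hi => by simp; omega)]
      simp [h0]
    · have hrem1 : 1 ≤ rem := by omega
      by_cases hk : rem ≤ k
      · -- range 1 (k+1) = R1 ++ rem :: R2
        have hsplit : PySem.List.pyRange 1 (k + 1) 1 =
            PySem.List.pyRange 1 rem 1 ++ rem :: PySem.List.pyRange (rem + 1) (k + 1) 1 := by
          rw [PySem.List.pyRange_one_append 1 rem (k + 1) hrem1 (by omega),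
              PySem.List.pyRange_one_cons (by omega : rem < k + 1)]
        rw [hsplit]
        have hR1 : ∀ i ∈ PySem.List.pyRange 1 rem 1, 1 ≤ i ∧ i < rem :=
          fun i hi => PySem.List.mem_pyRange_one.mp hi
        have hR2 : ∀ i ∈ PySem.List.pyRange (rem + 1) (k + 1) 1, rem < i :=
          fun i hi => by have := (PySem.List.mem_pyRange_one.mp hi).1; omega
        have hfR1lt : (PySem.List.pyRange 1 rem 1).filter (fun i => decide (i < rem)) =
            PySem.List.pyRange 1 rem 1 :=
          List.filter_eq_self.mpr (fun i hi => by simp [(hR1 i hi).2])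
        have hfR1eq : (PySem.List.pyRange 1 rem 1).filter (fun i => decide (i = rem)) = [] :=
          List.filter_eq_nil_iff.mpr (fun i hi => by have := (hR1 i hi).2; simp; omega)
        have hfR2lt : (PySem.List.pyRange (rem + 1) (k + 1) 1).filter (fun i => decide (i < rem)) = [] :=
          List.filter_eq_nil_iff.mpr (fun i hi => by have := hR2 i hi; simp; omega)
        have hfR2eq : (PySem.List.pyRange (rem + 1) (k + 1) 1).filter (fun i => decide (i = rem)) = [] :=
          List.filter_eq_nil_iff.mpr (fun i hi => by have := hR2 i hi; simp; omega)
        have hmapR2 : ((PySem.List.pyRange (rem + 1) (k + 1) 1).map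
            (fun i => if i ≤ rem then climbG k (rem - i) (path ++ [i]) else [])).flatten = [] := by
          apply List.flatten_eq_nil_iff.mpr
          intro l hl
          obtain ⟨i, hi, rfl⟩ := List.mem_map.mp hl
          have := hR2 i hi
          simp only [if_neg (by omega : ¬ i ≤ rem)]
        have hmapR1 : ((PySem.List.pyRange 1 rem 1).map
            (fun i => if i ≤ rem then climbG k (rem - i) (path ++ [i]) else [])) =
            (PySem.List.pyRange 1 rem 1).map (fun i => climbG k (rem - i) (path ++ [i])) :=
          List.map_congr_left (fun i hi => by simp [(by have := (hR1 i hi).2; omega : i ≤ rem)])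
        have hself : climbG k (rem - rem) (path ++ [rem]) = [path ++ [rem]] := by
          rw [climbG]; simp
        simp only [List.filter_append, List.filter_cons, hfR1lt, hfR1eq, hfR2lt, hfR2eq,
          List.map_append, List.map_cons, hmapR1, List.flatten_append, List.flatten_cons,
          if_pos (le_refl rem), hself, h0]
        simp [hmapR2, List.reverse_flatten, Function.comp_def]
      · -- rem > k : every i in range is < rem, no direct solution element
        have hall : ∀ i ∈ PySem.List.pyRange 1 (k + 1) 1, 1 ≤ i ∧ i < rem := by
          intro i hi
          have := PySem.List.mem_pyRange_one.mp hi
          omega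
        have hflt : (PySem.List.pyRange 1 (k + 1) 1).filter (fun i => decide (i < rem)) =
            PySem.List.pyRange 1 (k + 1) 1 :=
          List.filter_eq_self.mpr (fun i hi => by simp [(hall i hi).2])
        have hfeq : (PySem.List.pyRange 1 (k + 1) 1).filter (fun i => decide (i = rem)) = [] :=
          List.filter_eq_nil_iff.mpr (fun i hi => by have := (hall i hi).2; simp; omega)
        have hmap : ((PySem.List.pyRange 1 (k + 1) 1).map
            (fun i => if i ≤ rem then climbG k (rem - i) (path ++ [i]) else [])) =
            (PySem.List.pyRange 1 (k + 1) 1).map (fun i => climbG k (rem - i) (path ++ [i])) :=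
          List.map_congr_left (fun i hi => by simp [(by have := (hall i hi).2; omega : i ≤ rem)])
        simp [hflt, hfeq, hmap, h0, List.reverse_flatten, Function.comp_def]

-- Fuel weight of a pending node with remaining amount r.
def climbW (k : Int) (r : Int) : Nat := (k.toNat + 1) ^ r.toNat

lemma climbW_pos (k r : Int) : 1 ≤ climbW k r := Nat.one_le_pow _ _ (by omega)

lemma children_measure (k rem : Int) :
    (((PySem.List.pyRange 1 (k + 1) 1).filter (fun i => decide (i < rem))).reverse.map
      (fun i => climbW k (rem - i))).sum + 1 ≤ climbW k rem := by
  by_cases h : rem ≤ 0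
  · have : (PySem.List.pyRange 1 (k + 1) 1).filter (fun i => decide (i < rem)) = [] :=
      List.filter_eq_nil_iff.mpr
        (fun i hi => by have := (PySem.List.mem_pyRange_one.mp hi).1; simp; omega)
    rw [this]
    simpa using climbW_pos k rem
  · have hrem : 1 ≤ rem := by omega
    set L := (PySem.List.pyRange 1 (k + 1) 1).filter (fun i => decide (i < rem)) with hL
    have hbound : ∀ x ∈ L.reverse.map (fun i => climbW k (rem - i)), x ≤ climbW k (rem - 1) := by
      intro x hx
      obtain ⟨i, hi, rfl⟩ := List.mem_map.mp hx
      have hi' : i ∈ L := List.mem_reverse.mp hi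
      have h1 : 1 ≤ i := (PySem.List.mem_pyRange_one.mp (List.mem_of_mem_filter hi')).1
      exact Nat.pow_le_pow_right (by omega) (by omega)
    have hsum : (L.reverse.map (fun i => climbW k (rem - i))).sum ≤
        (L.reverse.map (fun i => climbW k (rem - i))).length * climbW k (rem - 1) := by
      simpa using List.sum_le_card_nsmul _ _ hbound
    have hlen : (L.reverse.map (fun i => climbW k (rem - i))).length ≤ k.toNat := by
      have hfl := List.length_filter_le (fun i => decide (i < rem)) (PySem.List.pyRange 1 (k + 1) 1)
      rw [← hL] at hfl
      have hlr : (PySem.List.pyRange 1 (k + 1) 1).length = k.toNat := by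
        rw [PySem.List.length_pyRange_one]; omega
      simp only [List.length_map, List.length_reverse]
      omega
    have hp : 1 ≤ climbW k (rem - 1) := climbW_pos k (rem - 1)
    have hpow : climbW k rem = climbW k (rem - 1) * (k.toNat + 1) := by
      unfold climbW
      have : rem.toNat = (rem - 1).toNat + 1 := by omega
      rw [this, pow_succ]
    have hmul : (L.reverse.map (fun i => climbW k (rem - i))).length * climbW k (rem - 1) ≤
        k.toNat * climbW k (rem - 1) := Nat.mul_le_mul_right _ hlen
    rw [hpow]
    have : climbW k (rem - 1) * (k.toNat + 1) = k.toNat * climbW k (rem - 1) + climbW k (rem - 1) := by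
      ring
    omega

-- The loop invariant: with enough fuel, the loop appends, for each pending node from the top
-- of the stack down, the reverse of B's recursion output for that node.
lemma loopA_inv (n k : Int) : ∀ (fuel : Nat) (q : List (List Int × Int)) (solns : List (List Int)),
    (q.map (fun s => climbW k (n - s.2))).sum ≤ fuel →
    climbA_loop n k fuel q solns
      = solns ++ (q.map (fun s => (climbG k (n - s.2) s.1).reverse)).flatten := by
  intro fuel
  induction fuel with
  | zero =>
    intro q solns h
    cases q with
    | nil => simp [climbA_loop]
    | cons s t =>
      exfalso
      have := climbW_pos k (n - s.2)
      simp at h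
      omega
  | succ m ih =>
    intro q solns h
    cases q with
    | nil => simp [climbA_loop]
    | cons s rest =>
      show climbA_loop n k m _ _ = _
      rw [stepFold n s.2 s.1 _ [] _]
      dsimp only
      simp only [List.append_nil]
      have hpe : (fun i => decide (s.2 + i < n)) = (fun i => decide (i < n - s.2)) := by
        funext i; rw [decide_eq_decide]; omega
      have hpe2 : (fun i => decide (s.2 + i = n)) = (fun i => decide (i = n - s.2)) := by
        funext i; rw [decide_eq_decide]; omega
      rw [hpe, hpe2]
      set C := ((PySem.List.pyRange 1 (k + 1) 1).filter (fun i => decide (i < n - s.2))).reverse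
        with hC
      have hmeas : ((C.map (fun i => (s.1 ++ [i], s.2 + i)) ++ rest).map
          (fun s' => climbW k (n - s'.2))).sum ≤ m := by
        have hc : ((C.map (fun i => (s.1 ++ [i], s.2 + i))).map
            (fun s' => climbW k (n - s'.2))).sum
            = (C.map (fun i => climbW k ((n - s.2) - i))).sum := by
          rw [List.map_map]
          congr 1
          apply List.map_congr_left
          intro i _
          simp only [Function.comp_apply]
          congr 1
          omega
        have hcm := children_measure k (n - s.2)
        rw [← hC] at hcm
        have hq : ((s :: rest).map (fun s' => climbW k (n - s'.2))).sum
            = climbW k (n - s.2) + (rest.map (fun s' => climbW k (n - s'.2))).sum := by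
          simp
        rw [List.map_append, List.sum_append, hc]
        rw [hq] at h
        omega
      rw [ih _ _ hmeas]
      have hauto : (if s.2 = n then solns ++ [s.1] else solns)
          = solns ++ (if n - s.2 = 0 then [s.1] else []) := by
        by_cases hs : s.2 = n
        · rw [if_pos hs, if_pos (by omega)]
        · rw [if_neg hs, if_neg (by omega)]; simp
      rw [hauto]
      have hrev := climbG_rev k (n - s.2) s.1
      rw [← hC] at hrev
      have hcmap : (C.map (fun i => (s.1 ++ [i], s.2 + i))).map
          (fun s' => (climbG k (n - s'.2) s'.1).reverse)
          = C.map (fun i => (climbG k ((n - s.2) - i) (s.1 ++ [i])).reverse) := by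
        rw [List.map_map]
        apply List.map_congr_left
        intro i _
        simp only [Function.comp_apply]
        congr 2
        omega
      simp only [List.map_cons, List.flatten_cons, List.map_append, List.flatten_append, hcmap,
        hrev, List.append_assoc]

-- ===== VERDICT (by name: the statement is the Claim_ definition above) =====
theorem climbingStaircase_spec : Claim_equal_climbingStaircase := by
  intro n k _
  show climbingStaircase n k = climbingStaircase_alt n k
  unfold climbingStaircase climbingStaircase_alt
  rw [loopA_inv n k _ [([], 0)] [] (by simp [climbW])]
  rw [climbB_go_eq]
  simp
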